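-- pv_equiv track=rewrite | github.com/ToastyPencil/CW2_ML | src/cw2_ml/al/typiclust.py | _choose_cluster
-- ===== SOURCE A (Python) =====
-- def _choose_cluster(
--     cluster_to_indices: dict[int, list[int]],
--     effective_labeled: set[int],
--     selected_set: set[int],
--     min_cluster_size: int,
-- ) -> int | None:
--     candidate_meta: list[tuple[int, int, int]] = []
--     for cluster_id, members in cluster_to_indices.items():
--         if len(members) < min_cluster_size:
--             continue
--         available = [idx for idx in members if idx not in effective_labeled and idx not in selected_set]
--         if not available:
--             continue
--         labeled_count = sum(idx in effective_labeled or idx in selected_set for idx in members)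
--         candidate_meta.append((cluster_id, labeled_count, len(members)))
--
--     if not candidate_meta:
--         return None
--
--     candidate_meta.sort(key=lambda item: (item[1], -item[2], item[0]))
--     return candidate_meta[0][0]
-- ===== SOURCE B (Python) =====
-- def _choose_cluster(
--     cluster_to_indices,
--     effective_labeled,
--     selected_set,
--     min_cluster_size,
-- ):
--     # One streaming pass: keep the running best (key, cluster_id); no candidate
--     # list, no sort.
--     best = None  # (key, cluster_id)
--     for cluster_id, members in cluster_to_indices.items():
--         if len(members) < min_cluster_size:
--             continue
--         available = 0
--         for idx in members:
--             if idx not in effective_labeled and idx not in selected_set: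
--                 available += 1
--         if available == 0:
--             continue
--         key = (len(members) - available, -len(members), cluster_id)
--         if best is None or key < best[0]:
--             best = (key, cluster_id)
--     return None if best is None else best[1]
-- ===== Notes on version B (the rewrite author's own statement) =====
-- stated objective: simpler
-- what changed: Replaces the build-candidate-list-then-sort pipeline with a single streaming pass that keeps a running best (key, cluster_id), computes available by counting instead of materialising the filtered list, and derives labeled_count as len(members) - available instead of a second membership pass.
import Mathlib
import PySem

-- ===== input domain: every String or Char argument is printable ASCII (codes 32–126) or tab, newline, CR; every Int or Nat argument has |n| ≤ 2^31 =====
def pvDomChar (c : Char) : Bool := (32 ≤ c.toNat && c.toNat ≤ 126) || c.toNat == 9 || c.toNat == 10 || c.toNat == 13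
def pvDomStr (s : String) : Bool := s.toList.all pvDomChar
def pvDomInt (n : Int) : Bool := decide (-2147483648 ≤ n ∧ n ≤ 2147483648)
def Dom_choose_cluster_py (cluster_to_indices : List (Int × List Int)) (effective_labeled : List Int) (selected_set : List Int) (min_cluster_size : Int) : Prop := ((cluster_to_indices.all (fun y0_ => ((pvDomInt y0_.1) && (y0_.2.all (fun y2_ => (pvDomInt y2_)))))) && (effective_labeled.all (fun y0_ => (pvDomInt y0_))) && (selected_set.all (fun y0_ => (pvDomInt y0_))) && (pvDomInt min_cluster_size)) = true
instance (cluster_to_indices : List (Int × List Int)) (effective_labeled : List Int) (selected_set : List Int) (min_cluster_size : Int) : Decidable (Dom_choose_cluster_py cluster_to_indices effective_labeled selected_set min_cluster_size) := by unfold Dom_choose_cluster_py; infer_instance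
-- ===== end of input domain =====

-- B replaces A's build-candidates-then-sort with one streaming pass keeping a running best; equal return value on every dict-shaped input (distinct cluster ids).

-- ===== PORT A =====
def choose_cluster_py (cluster_to_indices : List (Int × List Int)) (effective_labeled : List Int) (selected_set : List Int) (min_cluster_size : Int) : Option Int :=
  let candidate_meta : List (Int × Int × Int) :=
    cluster_to_indices.foldl (fun acc p =>
      if (p.2.length : Int) < min_cluster_size then acc
      else
        let available := p.2.filter (fun idx => !(effective_labeled.contains idx) && !(selected_set.contains idx))
        if available.isEmpty then acc
        else
          let labeled_count := p.2.foldl (fun s idx => s + (if effective_labeled.contains idx || selected_set.contains idx then (1 : Int) else 0)) 0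
          acc ++ [(p.1, labeled_count, (p.2.length : Int))]) []
  if candidate_meta.isEmpty then none
  else
    match PySem.List.sorted candidate_meta (fun it => toLex (it.2.1, toLex (-it.2.2, it.1))) false with
    | [] => none
    | c :: _ => some c.1

-- ===== PORT B =====
-- Python tuple '<' on (Int, Int, Int), lexicographic
def lt3 (a b : Int × Int × Int) : Bool :=
  decide (a.1 < b.1) || (a.1 == b.1 && (decide (a.2.1 < b.2.1) || (a.2.1 == b.2.1 && decide (a.2.2 < b.2.2))))

def choose_cluster_py_alt (cluster_to_indices : List (Int × List Int)) (effective_labeled : List Int) (selected_set : List Int) (min_cluster_size : Int) : Option Int :=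
  (cluster_to_indices.foldl (fun best p =>
      if (p.2.length : Int) < min_cluster_size then best
      else
        let available := p.2.foldl (fun n idx => if !(effective_labeled.contains idx) && !(selected_set.contains idx) then n + 1 else n) (0 : Int)
        if available == 0 then best
        else
          let key : Int × Int × Int := ((p.2.length : Int) - available, -(p.2.length : Int), p.1)
          match best with
          | none => some (key, p.1)
          | some b => if lt3 key b.1 then some (key, p.1) else some b)
    none).map (fun b => b.2)

-- ===== PRECONDITION & SPEC =====
-- Pre_ excludes association lists with duplicate cluster ids: they cannot arise
-- from the Python dict parameter (a dict collapses duplicate keys before either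
-- function runs), so the list-level behaviour there is representational, not A's.
def Pre_choose_cluster_py (cluster_to_indices : List (Int × List Int)) (effective_labeled : List Int) (selected_set : List Int) (min_cluster_size : Int) : Prop :=
  (cluster_to_indices.map (fun p => p.1)).Nodup
instance (cluster_to_indices : List (Int × List Int)) (effective_labeled : List Int) (selected_set : List Int) (min_cluster_size : Int) : Decidable (Pre_choose_cluster_py cluster_to_indices effective_labeled selected_set min_cluster_size) := by unfold Pre_choose_cluster_py; infer_instance

def pvWitness_choose_cluster_py : (List (Int × List Int)) × List Int × List Int × Int :=
  ([(0, [1, 2]), (1, [3])], [1], [], 1)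

def Spec_choose_cluster_py (cluster_to_indices : List (Int × List Int)) (effective_labeled : List Int) (selected_set : List Int) (min_cluster_size : Int) (out : Option Int) : Prop := out = choose_cluster_py_alt cluster_to_indices effective_labeled selected_set min_cluster_size
instance (cluster_to_indices : List (Int × List Int)) (effective_labeled : List Int) (selected_set : List Int) (min_cluster_size : Int) (out : Option Int) : Decidable (Spec_choose_cluster_py cluster_to_indices effective_labeled selected_set min_cluster_size out) := by unfold Spec_choose_cluster_py; infer_instance

-- ===== CLAIM (what is proved, stated in full; the proofs are below) =====
def Claim_equal_choose_cluster_py : Prop := ∀ (cluster_to_indices : List (Int × List Int)) (effective_labeled : List Int) (selected_set : List Int) (min_cluster_size : Int), Dom_choose_cluster_py cluster_to_indices effective_labeled selected_set min_cluster_size → Pre_choose_cluster_py cluster_to_indices effective_labeled selected_set min_cluster_size → Spec_choose_cluster_py cluster_to_indices effective_labeled selected_set min_cluster_size (choose_cluster_py cluster_to_indices effective_labeled selected_set min_cluster_size)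

-- ===== LEMMAS AND PROOFS =====

-- the candidate key as A's sort produces it, and its Lex image
def k3 (c : Int × Int × Int) : Int × Int × Int := (c.2.1, -c.2.2, c.1)
def T3 (x : Int × Int × Int) : Int ×ₗ (Int ×ₗ Int) := toLex (x.1, toLex (x.2.1, x.2.2))

-- filter predicate for "available" members
def pvAvailP (el ss : List Int) (idx : Int) : Bool := !(el.contains idx) && !(ss.contains idx)

-- candidate condition and candidate tuple
def pvC (el ss : List Int) (m : Int) (p : Int × List Int) : Bool :=
  !decide ((p.2.length : Int) < m) && !(p.2.filter (pvAvailP el ss)).isEmpty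

def pvF (el ss : List Int) (p : Int × List Int) : Int × Int × Int :=
  (p.1, p.2.foldl (fun s idx => s + (if el.contains idx || ss.contains idx then (1 : Int) else 0)) 0, (p.2.length : Int))

-- B's streaming step over candidates
def pvStep (best : Option ((Int × Int × Int) × Int)) (c : Int × Int × Int) : Option ((Int × Int × Int) × Int) :=
  match best with
  | none => some (k3 c, c.1)
  | some b => if lt3 (k3 c) b.1 then some (k3 c, c.1) else some b

theorem lt3_iff (a b : Int × Int × Int) : lt3 a b = true ↔ T3 a < T3 b := by
  simp [lt3, T3, Prod.Lex.lt_iff]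

theorem T3_inj {a b : Int × Int × Int} (h : T3 a = T3 b) : a = b := by
  simp only [T3, toLex_inj, Prod.mk.injEq] at h
  obtain ⟨h1, h2, h3⟩ := h
  exact Prod.ext h1 (Prod.ext h2 h3)

theorem k3_inj {a b : Int × Int × Int} (h : k3 a = k3 b) : a = b := by
  simp only [k3, Prod.mk.injEq] at h
  obtain ⟨h1, h2, h3⟩ := h
  refine Prod.ext h3 (Prod.ext h1 ?_)
  omega

theorem avail_foldl (el ss : List Int) : ∀ (ms : List Int) (n : Int),
    ms.foldl (fun n idx => if !(el.contains idx) && !(ss.contains idx) then n + 1 else n) n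
      = n + ((ms.filter (pvAvailP el ss)).length : Int) := by
  intro ms
  induction ms with
  | nil => intro n; simp
  | cons x t ih =>
    intro n
    rw [List.foldl_cons, List.filter_cons]
    by_cases hx : pvAvailP el ss x = true
    · have hx' : (!(el.contains x) && !(ss.contains x)) = true := hx
      rw [hx', if_pos rfl, ih, hx, if_pos rfl]
      push_cast [List.length_cons]
      omega
    · have hxf : pvAvailP el ss x = false := by simpa using hx
      have hx' : (!(el.contains x) && !(ss.contains x)) = false := hxf
      rw [hx', if_neg Bool.false_ne_true, ih, hxf, if_neg Bool.false_ne_true]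

theorem lc_foldl (el ss : List Int) : ∀ (ms : List Int) (s : Int),
    ms.foldl (fun s idx => s + (if el.contains idx || ss.contains idx then (1 : Int) else 0)) s
      = s + (ms.length : Int) - ((ms.filter (pvAvailP el ss)).length : Int) := by
  intro ms
  induction ms with
  | nil => intro s; simp
  | cons x t ih =>
    intro s
    rw [List.foldl_cons, List.filter_cons]
    by_cases hor : (el.contains x || ss.contains x) = true
    · have hav : pvAvailP el ss x = false := by
        simp only [pvAvailP]
        cases ha : el.contains x <;> cases hb : ss.contains x <;> simp_all
      rw [hor, if_pos rfl, ih, hav, if_neg Bool.false_ne_true]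
      push_cast [List.length_cons]
      omega
    · have hor' : (el.contains x || ss.contains x) = false := by simpa using hor
      have hav : pvAvailP el ss x = true := by
        simp only [pvAvailP]
        cases ha : el.contains x <;> cases hb : ss.contains x <;> simp_all
      rw [hor', if_neg Bool.false_ne_true, ih, hav, if_pos rfl]
      push_cast [List.length_cons]
      omega

theorem candsA (el ss : List Int) (m : Int) : ∀ (ctx : List (Int × List Int)) (acc : List (Int × Int × Int)),
    ctx.foldl (fun acc p =>
      if (p.2.length : Int) < m then acc
      else
        let available := p.2.filter (fun idx => !(el.contains idx) && !(ss.contains idx))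
        if available.isEmpty then acc
        else
          let labeled_count := p.2.foldl (fun s idx => s + (if el.contains idx || ss.contains idx then (1 : Int) else 0)) 0
          acc ++ [(p.1, labeled_count, (p.2.length : Int))]) acc
      = acc ++ (ctx.filter (pvC el ss m)).map (pvF el ss) := by
  intro ctx
  induction ctx with
  | nil => intro acc; simp
  | cons p t ih =>
    intro acc
    rw [List.foldl_cons, List.filter_cons]
    by_cases hlt : (p.2.length : Int) < m
    · have hC : pvC el ss m p = false := by simp [pvC, hlt]
      rw [if_pos hlt, hC, if_neg Bool.false_ne_true, ih]
    · rw [if_neg hlt]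
      by_cases he : (p.2.filter (pvAvailP el ss)).isEmpty = true
      · have hC : pvC el ss m p = false := by
          simp only [pvC, he]
          simp
        show t.foldl _ (if (p.2.filter (pvAvailP el ss)).isEmpty = true then acc else _) = _
        rw [if_pos he, hC, if_neg Bool.false_ne_true, ih]
      · have he' : (p.2.filter (pvAvailP el ss)).isEmpty = false := by
          simpa using he
        have hC : pvC el ss m p = true := by
          simp only [pvC, hlt, he']
          simp
        show t.foldl _ (if (p.2.filter (pvAvailP el ss)).isEmpty = true then acc else _) = _
        rw [if_neg he, hC, if_pos rfl, ih]
        show (acc ++ [pvF el ss p]) ++ _ = _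
        rw [List.append_assoc, List.map_cons, List.singleton_append]

theorem foldB (el ss : List Int) (m : Int) : ∀ (ctx : List (Int × List Int)) (best : Option ((Int × Int × Int) × Int)),
    ctx.foldl (fun best p =>
      if (p.2.length : Int) < m then best
      else
        let available := p.2.foldl (fun n idx => if !(el.contains idx) && !(ss.contains idx) then n + 1 else n) (0 : Int)
        if available == 0 then best
        else
          let key : Int × Int × Int := ((p.2.length : Int) - available, -(p.2.length : Int), p.1)
          match best with
          | none => some (key, p.1)
          | some b => if lt3 key b.1 then some (key, p.1) else some b) best
      = ((ctx.filter (pvC el ss m)).map (pvF el ss)).foldl pvStep best := by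
  intro ctx
  induction ctx with
  | nil => intro best; simp
  | cons p t ih =>
    intro best
    have havail := avail_foldl el ss p.2 0
    rw [List.foldl_cons, List.filter_cons]
    by_cases hlt : (p.2.length : Int) < m
    · have hC : pvC el ss m p = false := by simp [pvC, hlt]
      rw [if_pos hlt, hC, if_neg Bool.false_ne_true, ih]
    · rw [if_neg hlt]
      by_cases he : (p.2.filter (pvAvailP el ss)) = []
      · have hC : pvC el ss m p = false := by simp [pvC, he]
        have hz : ((p.2.foldl (fun n idx => if !(el.contains idx) && !(ss.contains idx) then n + 1 else n) (0 : Int)) == 0) = true := by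
          rw [havail, he]
          simp
        show t.foldl _ (if ((p.2.foldl (fun n idx => if !(el.contains idx) && !(ss.contains idx) then n + 1 else n) (0 : Int)) == 0) = true then best else _) = _
        rw [if_pos hz, hC, if_neg Bool.false_ne_true, ih]
      · have hlen : (p.2.filter (pvAvailP el ss)).length ≠ 0 := by
          simpa [List.length_eq_zero_iff] using he
        have he' : (p.2.filter (pvAvailP el ss)).isEmpty = false := by
          simp [he]
        have hC : pvC el ss m p = true := by
          simp only [pvC, hlt, he']
          simp
        have hz : ((p.2.foldl (fun n idx => if !(el.contains idx) && !(ss.contains idx) then n + 1 else n) (0 : Int)) == 0) = false := by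
          rw [havail]
          simp only [beq_eq_false_iff_ne, ne_eq]
          omega
        have hkey : k3 (pvF el ss p) = (((p.2.length : Int) - (p.2.foldl (fun n idx => if !(el.contains idx) && !(ss.contains idx) then n + 1 else n) (0 : Int)), -(p.2.length : Int), p.1) : Int × Int × Int) := by
          show ((p.2.foldl (fun s idx => s + (if el.contains idx || ss.contains idx then (1 : Int) else 0)) 0), -(p.2.length : Int), p.1) = _
          rw [havail, lc_foldl el ss p.2 0]
          have heq : (0 : Int) + (p.2.length : Int) - ((p.2.filter (pvAvailP el ss)).length : Int) = (p.2.length : Int) - (0 + ((p.2.filter (pvAvailP el ss)).length : Int)) := by omega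
          rw [heq]
        show t.foldl _ (if ((p.2.foldl (fun n idx => if !(el.contains idx) && !(ss.contains idx) then n + 1 else n) (0 : Int)) == 0) = true then best else _) = _
        rw [hz, if_neg Bool.false_ne_true, hC, if_pos rfl, List.map_cons, List.foldl_cons, ih]
        congr 1
        rw [← hkey]
        cases best <;> rfl

theorem step_some : ∀ (cs : List (Int × Int × Int)) (q : (Int × Int × Int) × Int),
    ∃ r, cs.foldl pvStep (some q) = some r := by
  intro cs
  induction cs with
  | nil => intro q; exact ⟨q, rfl⟩
  | cons c t ih =>
    intro q
    by_cases h : lt3 (k3 c) q.1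
    · simpa [pvStep, h] using ih (k3 c, c.1)
    · simpa [pvStep, h] using ih q

theorem step_shape : ∀ (cs : List (Int × Int × Int)) (b : Option ((Int × Int × Int) × Int)) (r : (Int × Int × Int) × Int),
    cs.foldl pvStep b = some r → b = some r ∨ ∃ c ∈ cs, r = (k3 c, c.1) := by
  intro cs
  induction cs with
  | nil => intro b r h; exact Or.inl h
  | cons c t ih =>
    intro b r h
    rw [List.foldl_cons] at h
    rcases ih (pvStep b c) r h with h1 | ⟨c', hc', he⟩
    · cases b with
      | none =>
        right
        refine ⟨c, List.mem_cons_self, ?_⟩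
        have : some (k3 c, c.1) = some r := h1
        exact (Option.some.inj this).symm
      | some q =>
        by_cases hq : lt3 (k3 c) q.1
        · right
          refine ⟨c, List.mem_cons_self, ?_⟩
          simp only [pvStep, hq, if_true] at h1
          exact (Option.some.inj h1).symm
        · left
          simpa [pvStep, hq] using h1
    · exact Or.inr ⟨c', List.mem_cons_of_mem _ hc', he⟩

theorem step_min : ∀ (cs : List (Int × Int × Int)) (b : Option ((Int × Int × Int) × Int)) (r : (Int × Int × Int) × Int),
    cs.foldl pvStep b = some r →
      (∀ q, b = some q → T3 r.1 ≤ T3 q.1) ∧ (∀ c ∈ cs, T3 r.1 ≤ T3 (k3 c)) := by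
  intro cs
  induction cs with
  | nil =>
    intro b r h
    refine ⟨?_, ?_⟩
    · intro q hq
      rw [hq] at h
      cases Option.some.inj h
      exact le_refl _
    · intro c hc
      cases hc
  | cons c t ih =>
    intro b r h
    rw [List.foldl_cons] at h
    obtain ⟨q', hq', hle_c, hle_b⟩ :
        ∃ q', pvStep b c = some q' ∧ T3 q'.1 ≤ T3 (k3 c) ∧ (∀ q, b = some q → T3 q'.1 ≤ T3 q.1) := by
      cases b with
      | none =>
        exact ⟨(k3 c, c.1), rfl, le_refl _, by intro q hq; cases hq⟩
      | some q =>
        by_cases hq : lt3 (k3 c) q.1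
        · refine ⟨(k3 c, c.1), by simp [pvStep, hq], le_refl _, ?_⟩
          intro q0 hq0
          cases Option.some.inj hq0
          exact le_of_lt ((lt3_iff _ _).mp hq)
        · refine ⟨q, by simp [pvStep, hq], ?_, ?_⟩
          · refine le_of_not_gt (fun hgt => hq ?_)
            rw [lt3_iff]
            exact hgt
          · intro q0 hq0
            cases Option.some.inj hq0
            exact le_refl _
    rw [hq'] at h
    obtain ⟨ih1, ih2⟩ := ih (some q') r h
    have hrq' : T3 r.1 ≤ T3 q'.1 := ih1 q' rfl
    refine ⟨fun q hq => le_trans hrq' (hle_b q hq), fun c' hc' => ?_⟩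
    rcases List.mem_cons.mp hc' with rfl | hmem
    · exact le_trans hrq' hle_c
    · exact ih2 c' hmem

-- ===== VERDICT (by name: the statement is the Claim_ definition above) =====
theorem choose_cluster_py_spec : Claim_equal_choose_cluster_py := by
  unfold Claim_equal_choose_cluster_py
  intro ctx el ss m _hdom _hpre
  unfold Spec_choose_cluster_py choose_cluster_py choose_cluster_py_alt
  rw [candsA el ss m ctx [], foldB el ss m ctx none, List.nil_append]
  cases hcs : (ctx.filter (pvC el ss m)).map (pvF el ss) with
  | nil => simp
  | cons c0 rest =>
    obtain ⟨r, hr⟩ := step_some rest (k3 c0, c0.1)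
    have hBfold : (c0 :: rest).foldl pvStep none = some r := by
      rw [List.foldl_cons]
      exact hr
    cases hs : PySem.List.sorted (c0 :: rest) (fun it => toLex (it.2.1, toLex (-it.2.2, it.1))) false with
    | nil =>
      exact absurd ((PySem.List.sorted_eq_nil_iff _ _ _).mp hs) (by simp)
    | cons mhd mtl =>
      have hmem_m : mhd ∈ (c0 :: rest) := by
        have hm : mhd ∈ PySem.List.sorted (c0 :: rest) (fun it => toLex (it.2.1, toLex (-it.2.2, it.1))) false := by
          rw [hs]
          exact List.mem_cons_self
        exact ((PySem.List.sorted_perm (c0 :: rest) (fun it => toLex (it.2.1, toLex (-it.2.2, it.1))) false).mem_iff).mp hm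
      have hhead := PySem.List.key_head_sorted_le (c0 :: rest) (fun it => toLex (it.2.1, toLex (-it.2.2, it.1))) hs
      rcases step_shape (c0 :: rest) none r hBfold with hnone | ⟨c, hc, hrc⟩
      · cases hnone
      have hmin := (step_min (c0 :: rest) none r hBfold).2
      have h1 : T3 (k3 c) ≤ T3 (k3 mhd) := by
        have := hmin mhd hmem_m
        rw [hrc] at this
        exact this
      have h2 : T3 (k3 mhd) ≤ T3 (k3 c) := hhead c hc
      have hceq : c = mhd := k3_inj (T3_inj (le_antisymm h1 h2))
      rw [hBfold]
      show (if (c0 :: rest).isEmpty = true then none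
            else match PySem.List.sorted (c0 :: rest) (fun it => toLex (it.2.1, toLex (-it.2.2, it.1))) false with
                 | [] => none
                 | c :: _ => some c.1) = Option.map (fun b => b.2) (some r)
      rw [List.isEmpty_cons, if_neg Bool.false_ne_true, hs, hrc]
      subst hceq
      rfl
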